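-- pv_equiv track=rewrite | github.com/Oz454/Unfinished-Yahtzee | yahtzee.py | three_of_kind
-- ===== SOURCE A (Python) =====
-- def three_of_kind(roll):
--     total = 0
--     same = 0
--     three = False
--     for dice in roll:
--         if same == 3:
--             three = True
--             break
--         same = 0
--         for num in roll:
--             if dice == num:
--                 same += 1
--     if three == True:
--         for dice in roll:
--             total += dice
--     else:
--         total = 0
--     return(total)
-- ===== SOURCE B (Python) =====
-- def three_of_kind(roll):
--     counts = {}
--     for d in roll:
--         counts[d] = counts.get(d, 0) + 1
--     return sum(roll) if 3 in counts.values() else 0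
-- ===== Notes on version B (the rewrite author's own statement) =====
-- stated objective: idiomatic
-- what changed: B builds a frequency table in one pass and returns sum(roll) iff 3 is among the counts, replacing A's break-driven nested rescan of the whole list for every die (and its never-checks-the-last-element loop shape, which is provably harmless).
import Mathlib
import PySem

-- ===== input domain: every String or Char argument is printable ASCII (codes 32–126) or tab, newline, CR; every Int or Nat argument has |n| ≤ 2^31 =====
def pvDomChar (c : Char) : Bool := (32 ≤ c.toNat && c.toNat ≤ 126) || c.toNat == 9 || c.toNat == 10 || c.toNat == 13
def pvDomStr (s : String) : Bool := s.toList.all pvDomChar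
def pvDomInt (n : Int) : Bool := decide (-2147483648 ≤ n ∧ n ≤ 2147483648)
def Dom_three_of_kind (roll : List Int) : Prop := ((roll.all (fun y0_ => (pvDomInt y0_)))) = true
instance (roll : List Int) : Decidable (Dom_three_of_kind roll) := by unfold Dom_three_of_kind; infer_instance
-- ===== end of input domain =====

-- B: one-pass frequency table, then 'sum(roll) if 3 in counts.values() else 0' — idiomatic
-- replacement for A's break-driven nested rescan (A never checks the last die's count, which is harmless).
-- ===== PORT A =====
-- inner loop: 'same = 0; for num in roll: if dice == num: same += 1'
def pvInnerCount (roll : List Int) (dice : Int) : Int :=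
  roll.foldl (fun same num => if dice == num then same + 1 else same) 0

-- outer loop with break: state 'same'; returns the final value of 'three'
def pvOuterLoop (roll : List Int) : List Int → Int → Bool
  | [], _ => false
  | dice :: rest, same =>
      if same == 3 then true else pvOuterLoop roll rest (pvInnerCount roll dice)

def three_of_kind (roll : List Int) : Int :=
  if pvOuterLoop roll roll 0 then roll.foldl (fun total dice => total + dice) 0 else 0

-- ===== PORT B =====
def three_of_kind_alt (roll : List Int) : Int :=
  let counts : PySem.Dict Int Int :=
    roll.foldl (fun d x => d.insert x (d.getD x 0 + 1)) PySem.Dict.empty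
  if counts.values.contains 3 then roll.sum else 0

-- ===== PRECONDITION & SPEC =====
def Spec_three_of_kind (roll : List Int) (out : Int) : Prop := out = three_of_kind_alt roll
instance (roll : List Int) (out : Int) : Decidable (Spec_three_of_kind roll out) := by unfold Spec_three_of_kind; infer_instance

-- ===== CLAIM (what is proved, stated in full; the proofs are below) =====
def Claim_equal_three_of_kind : Prop := ∀ (roll : List Int), Dom_three_of_kind roll → Spec_three_of_kind roll (three_of_kind roll)

-- ===== LEMMAS AND PROOFS =====

theorem pvInnerCount_aux (d : Int) (l : List Int) (a : Int) :
    l.foldl (fun same num => if d == num then same + 1 else same) a = a + l.count d := by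
  induction l generalizing a with
  | nil => simp
  | cons x xs ih =>
      rw [List.foldl_cons, ih, List.count_cons]
      by_cases h : d = x
      · rw [if_pos (by simpa using h), if_pos (by simpa using h.symm)]
        push_cast
        ring
      · rw [if_neg (by simpa using h), if_neg (by simpa using (Ne.symm h))]
        push_cast
        ring

theorem pvInnerCount_eq (roll : List Int) (d : Int) :
    pvInnerCount roll d = (roll.count d : Int) := by
  unfold pvInnerCount
  rw [pvInnerCount_aux]
  omega

theorem pvOuterLoop_cons (roll : List Int) (x : Int) (xs : List Int) (s : Int) :
    pvOuterLoop roll (x :: xs) s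
      = if s == 3 then true else pvOuterLoop roll xs (pvInnerCount roll x) := rfl

theorem pvOuterLoop_iff (roll l : List Int) (s : Int) :
    pvOuterLoop roll l s = true ↔ ((s = 3 ∧ l ≠ []) ∨ ∃ d ∈ l.dropLast, roll.count d = 3) := by
  induction l generalizing s with
  | nil => simp [pvOuterLoop]
  | cons x xs ih =>
      rw [pvOuterLoop_cons]
      by_cases h : s = 3
      · simp [h]
      · rw [if_neg (by simpa using h), ih, pvInnerCount_eq]
        cases xs with
        | nil => simp [h]
        | cons y ys =>
            have hdl : (x :: y :: ys).dropLast = x :: (y :: ys).dropLast := by simp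
            rw [hdl]
            constructor
            · rintro (⟨hc, _⟩ | ⟨d, hd, hcd⟩)
              · exact Or.inr ⟨x, by simp, by exact_mod_cast hc⟩
              · exact Or.inr ⟨d, List.mem_cons_of_mem _ hd, hcd⟩
            · rintro (⟨hc, _⟩ | ⟨d, hd, hcd⟩)
              · exact absurd hc h
              · rcases List.mem_cons.mp hd with rfl | hd
                · exact Or.inl ⟨by exact_mod_cast hcd, by simp⟩
                · exact Or.inr ⟨d, hd, hcd⟩

theorem exists_dropLast_iff (roll : List Int) :
    (∃ d ∈ roll.dropLast, roll.count d = 3) ↔ (∃ d ∈ roll, roll.count d = 3) := by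
  constructor
  · rintro ⟨d, hd, hc⟩
    exact ⟨d, roll.dropLast_sublist.mem hd, hc⟩
  · rintro ⟨d, hd, hc⟩
    refine ⟨d, ?_, hc⟩
    have hne : roll ≠ [] := by rintro rfl; simp at hd
    have hsplit := List.dropLast_append_getLast hne
    have hcnt : roll.count d = roll.dropLast.count d + [roll.getLast hne].count d := by
      conv_lhs => rw [← hsplit]
      simp [List.count_append]
    have h1 : [roll.getLast hne].count d ≤ 1 := by
      simp [List.count_singleton]
      split_ifs <;> simp
    have hpos : 0 < roll.dropLast.count d := by omega
    exact List.count_pos_iff.mp hpos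

theorem b_cond_iff (roll : List Int) :
    ((roll.foldl (fun d x => d.insert x (d.getD x 0 + 1))
        (PySem.Dict.empty : PySem.Dict Int Int)).values.contains 3 = true)
      ↔ (∃ d ∈ roll, roll.count d = 3) := by
  rw [PySem.Dict.foldl_insert_getD_add_one_eq_counter]
  have hv : (PySem.Dict.counter roll).values
      = (PySem.Set.ofList roll).map (fun k => (roll.count k : Int)) := by
    show (PySem.Dict.counter roll).items.map Prod.snd = _
    rw [PySem.Dict.items_counter]
    simp [List.map_map, Function.comp]
  rw [hv]
  simp only [List.contains_iff_mem, List.mem_map, PySem.Set.mem_ofList]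
  constructor
  · rintro ⟨d, hd, hc⟩
    exact ⟨d, hd, by omega⟩
  · rintro ⟨d, hd, hc⟩
    exact ⟨d, hd, by omega⟩

-- ===== VERDICT (by name: the statement is the Claim_ definition above) =====
theorem three_of_kind_spec : Claim_equal_three_of_kind := by
  intro roll _
  show three_of_kind roll = three_of_kind_alt roll
  unfold three_of_kind three_of_kind_alt
  have ha : pvOuterLoop roll roll 0 = true ↔ (∃ d ∈ roll, roll.count d = 3) := by
    rw [pvOuterLoop_iff, ← exists_dropLast_iff]
    constructor
    · rintro (⟨h, _⟩ | h)
      · omega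
      · exact h
    · exact Or.inr
  by_cases h : ∃ d ∈ roll, roll.count d = 3
  · rw [if_pos (ha.mpr h), if_pos ((b_cond_iff roll).mpr h), List.sum_eq_foldl]
  · rw [if_neg (fun hc => h (ha.mp hc)),
        if_neg (fun hc => h ((b_cond_iff roll).mp hc))]
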